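-- pv_equiv track=rewrite | github.com/RuzannaO/pyTraining | week1/homework1.py | mirror_string
-- ===== SOURCE A (Python) =====
-- def mirror_string(a):
--     b = ""
--     for i in a:
--         if ord(i) <= 122 and ord(i) >= 97:
--             b = b + chr(122 - (ord(i) - 97))
--         else:
--             if ord(i) <= 90 and ord(i) >= 65:
--                 b = b + chr(90 - (ord(i) - 65))
--             else:
--                 b = b + i
--     return(b)
-- ===== SOURCE B (Python) =====
-- _lo = 'abcdefghijklmnopqrstuvwxyz'
-- _up = 'ABCDEFGHIJKLMNOPQRSTUVWXYZ'
-- _table = str.maketrans(_lo + _up, _lo[::-1] + _up[::-1])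
--
-- def mirror_string(a):
--     return a.translate(_table)
-- ===== Notes on version B (the rewrite author's own statement) =====
-- stated objective: idiomatic
-- what changed: Replaces the explicit per-character loop with nested ord-range branches by a translation table built once with str.maketrans and a single str.translate call.
import Mathlib
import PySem

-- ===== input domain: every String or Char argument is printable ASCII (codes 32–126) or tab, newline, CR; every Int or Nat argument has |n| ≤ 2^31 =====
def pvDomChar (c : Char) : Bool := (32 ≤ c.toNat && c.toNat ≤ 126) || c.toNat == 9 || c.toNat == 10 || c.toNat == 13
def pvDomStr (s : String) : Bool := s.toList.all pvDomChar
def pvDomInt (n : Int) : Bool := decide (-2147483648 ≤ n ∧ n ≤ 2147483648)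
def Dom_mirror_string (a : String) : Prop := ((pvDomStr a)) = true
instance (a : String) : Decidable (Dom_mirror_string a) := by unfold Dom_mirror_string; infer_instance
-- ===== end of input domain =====

-- B replaces A's per-character loop with nested ord-range branches by a 52-entry
-- translation table built once (str.maketrans) and applied in one pass (str.translate).

-- ===== PORT A =====
-- literal port of A: fold over the characters, appending to accumulator b
def mirror_string (a : String) : String :=
  a.toList.foldl
    (fun b i =>
      if i.toNat ≤ 122 ∧ 97 ≤ i.toNat then
        b ++ String.singleton (Char.ofNat (122 - (i.toNat - 97)))
      else if i.toNat ≤ 90 ∧ 65 ≤ i.toNat then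
        b ++ String.singleton (Char.ofNat (90 - (i.toNat - 65)))
      else
        b ++ String.singleton i)
    ""

-- ===== PORT B =====
-- the translation table: lowercase and uppercase alphabets zipped with their reverses
def pvLower : List Char := "abcdefghijklmnopqrstuvwxyz".toList
def pvUpper : List Char := "ABCDEFGHIJKLMNOPQRSTUVWXYZ".toList
def pvTable : PySem.Dict Char Char :=
  PySem.Dict.ofList ((pvLower.zip pvLower.reverse) ++ (pvUpper.zip pvUpper.reverse))

-- str.translate: map each character through the table, identity on misses
def mirror_string_alt (a : String) : String :=
  String.ofList (a.toList.map (fun c => pvTable.getD c c))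

-- ===== PRECONDITION & SPEC =====
def Spec_mirror_string (a : String) (out : String) : Prop := out = mirror_string_alt a
instance (a : String) (out : String) : Decidable (Spec_mirror_string a out) := by unfold Spec_mirror_string; infer_instance

-- ===== CLAIM (what is proved, stated in full; the proofs are below) =====
def Claim_equal_mirror_string : Prop := ∀ (a : String), Dom_mirror_string a → Spec_mirror_string a (mirror_string a)

-- ===== LEMMAS AND PROOFS =====

-- A's per-character branch as a function of the character
def pvStep (i : Char) : Char :=
  if i.toNat ≤ 122 ∧ 97 ≤ i.toNat then Char.ofNat (122 - (i.toNat - 97))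
  else if i.toNat ≤ 90 ∧ 65 ≤ i.toNat then Char.ofNat (90 - (i.toNat - 65))
  else i

set_option maxRecDepth 4000 in
theorem pvChar_eq (c : Char) (h : pvDomChar c = true) : pvStep c = pvTable.getD c c := by
  have hle : c.toNat ≤ 126 := by
    simp only [pvDomChar, Bool.or_eq_true, Bool.and_eq_true, decide_eq_true_eq,
      beq_iff_eq] at h
    omega
  have key : ∀ n : Nat, n < 127 →
      pvStep (Char.ofNat n) = pvTable.getD (Char.ofNat n) (Char.ofNat n) := by decide
  have hc : Char.ofNat c.toNat = c := Char.ofNat_toNat c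
  rw [← hc]
  exact key c.toNat (by omega)

theorem pvFold_eq (l : List Char) (hl : ∀ c ∈ l, pvDomChar c = true) (acc : String) :
    (l.foldl
      (fun b i =>
        if i.toNat ≤ 122 ∧ 97 ≤ i.toNat then
          b ++ String.singleton (Char.ofNat (122 - (i.toNat - 97)))
        else if i.toNat ≤ 90 ∧ 65 ≤ i.toNat then
          b ++ String.singleton (Char.ofNat (90 - (i.toNat - 65)))
        else
          b ++ String.singleton i)
      acc).toList = acc.toList ++ l.map (fun c => pvTable.getD c c) := by
  induction l generalizing acc with
  | nil => simp
  | cons c t ih =>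
    have hc := pvChar_eq c (hl c (List.mem_cons_self ..))
    have ht : ∀ x ∈ t, pvDomChar x = true := fun x hx => hl x (List.mem_cons_of_mem _ hx)
    simp only [List.foldl_cons, List.map_cons]
    rw [ih ht]
    unfold pvStep at hc
    split_ifs at hc ⊢ with h1 h2 <;> simp [← hc]

-- ===== VERDICT (by name: the statement is the Claim_ definition above) =====
theorem mirror_string_spec : Claim_equal_mirror_string := by
  intro a hdom
  unfold Spec_mirror_string mirror_string mirror_string_alt
  apply String.toList_injective
  have hl : ∀ c ∈ a.toList, pvDomChar c = true := by
    simpa [Dom_mirror_string, pvDomStr, List.all_eq_true] using hdom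
  simpa using pvFold_eq a.toList hl ""
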